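-- pv_equiv track=rewrite | github.com/d2xi/Advent-of-Code | 22/d06_tuning_trouble/src/task1.py | sop_marker_offset
-- ===== SOURCE A (Python) =====
-- def sop_marker_offset(datastream,frame_len=4):
-- 	beg=0
-- 	end=beg+frame_len
-- 	frame=''
-- 	offset=None
-- 	while end<=len(datastream):
-- 		frame=datastream[beg:end]
-- 		if len(set(frame))==frame_len:
-- 			offset=end
-- 			break
-- 		beg+=1
-- 		end+=1
-- 	return offset
-- ===== SOURCE B (Python) =====
-- def sop_marker_offset(datastream, frame_len=4):
--     if frame_len < 0:
--         return None
--     if frame_len == 0: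
--         return 0
--     counts = {}
--     dups = 0  # number of duplicate occurrences in the current window
--     for i, c in enumerate(datastream):
--         counts[c] = counts.get(c, 0) + 1
--         if counts[c] > 1:
--             dups += 1
--         if i >= frame_len:
--             d = datastream[i - frame_len]
--             counts[d] -= 1
--             if counts[d] > 0:
--                 dups -= 1
--         if i + 1 >= frame_len and dups == 0:
--             return i + 1
--     return None
-- ===== Notes on version B (the rewrite author's own statement) =====
-- stated objective: faster
-- what changed: A re-slices and builds a fresh set for every window (O(n*frame_len)); B makes one pass with a sliding char-count map and a duplicate-occurrence counter, so each step is O(1).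
import Mathlib
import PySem

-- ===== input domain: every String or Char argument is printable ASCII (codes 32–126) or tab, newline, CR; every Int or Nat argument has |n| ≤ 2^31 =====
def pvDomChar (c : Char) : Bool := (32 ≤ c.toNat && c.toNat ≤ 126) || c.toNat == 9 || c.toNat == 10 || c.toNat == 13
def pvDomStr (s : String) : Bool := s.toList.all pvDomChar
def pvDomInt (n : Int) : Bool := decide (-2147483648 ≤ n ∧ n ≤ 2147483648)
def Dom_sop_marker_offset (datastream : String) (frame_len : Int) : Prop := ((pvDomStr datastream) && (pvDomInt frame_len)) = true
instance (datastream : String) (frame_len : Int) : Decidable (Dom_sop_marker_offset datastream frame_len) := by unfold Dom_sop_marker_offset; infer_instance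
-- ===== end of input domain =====

-- B replaces A's per-window slice+set (O(n*frame_len)) by a one-pass sliding window with a
-- char-count map and a duplicate counter (O(n)); proved to return the same Option Int everywhere.


-- ===== PORT A =====
-- the while loop: state is beg (end = beg + frame_len); frame/offset are the per-iteration values
def sopLoopA (s : List Char) (fl : Int) (beg : Int) : Option Int :=
  if h : beg + fl ≤ (s.length : Int) then
    let frame := PySem.List.slice s (some beg) (some (beg + fl))
    if ((PySem.Set.ofList frame).length : Int) = fl then some (beg + fl)
    else sopLoopA s fl (beg + 1)
  else none
termination_by ((s.length : Int) - fl - beg + 1).toNat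
decreasing_by omega

def sop_marker_offset (datastream : String) (frame_len : Int) : Option Int :=
  sopLoopA datastream.toList frame_len 0

-- ===== PORT B =====
-- the for-loop over enumerate(datastream): i is the running index, rest the characters still to
-- process; counts holds the char counts of the current window, dups its duplicate occurrences
def sopLoopB (s : List Char) (fl : Int) (i : Nat) (counts : PySem.Dict Char Int) (dups : Int)
    (rest : List Char) : Option Int :=
  match rest with
  | [] => none
  | c :: rest' =>
    let counts1 := counts.modify c 0 (· + 1)
    let dups1 := if 1 < counts1.getD c 0 then dups + 1 else dups
    let st :=
      if fl ≤ (i : Int) then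
        let d := PySem.List.pyGetD s ((i : Int) - fl) ' '
        let counts2 := counts1.modify d 0 (· - 1)
        (counts2, if 0 < counts2.getD d 0 then dups1 - 1 else dups1)
      else (counts1, dups1)
    if fl ≤ (i : Int) + 1 ∧ st.2 = 0 then some ((i : Int) + 1)
    else sopLoopB s fl (i + 1) st.1 st.2 rest'

def sop_marker_offset_alt (datastream : String) (frame_len : Int) : Option Int :=
  if frame_len < 0 then none
  else if frame_len = 0 then some 0
  else sopLoopB datastream.toList frame_len 0 PySem.Dict.empty 0 datastream.toList

-- ===== PRECONDITION & SPEC =====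
def Spec_sop_marker_offset (datastream : String) (frame_len : Int) (out : Option Int) : Prop := out = sop_marker_offset_alt datastream frame_len
instance (datastream : String) (frame_len : Int) (out : Option Int) : Decidable (Spec_sop_marker_offset datastream frame_len out) := by unfold Spec_sop_marker_offset; infer_instance

-- ===== CLAIM (what is proved, stated in full; the proofs are below) =====
def Claim_equal_sop_marker_offset : Prop := ∀ (datastream : String) (frame_len : Int), Dom_sop_marker_offset datastream frame_len → Spec_sop_marker_offset datastream frame_len (sop_marker_offset datastream frame_len)

-- ===== LEMMAS AND PROOFS =====

-- the common reference search: first window start b' ≥ b with b' + fl ≤ |s| whose window is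
-- duplicate-free, reported as its end offset b' + fl
def findFrom (s : List Char) (fl : Nat) (b : Nat) : Option Int :=
  if h : b + fl ≤ s.length then
    if ((s.drop b).take fl).Nodup then some ((b : Int) + fl)
    else findFrom s fl (b + 1)
  else none
termination_by s.length + 1 - b

-- len(set(l)) counts the distinct elements of l
theorem setLen (l : List Char) : (PySem.Set.ofList l).length = l.toFinset.card := by
  have hnd : (PySem.Set.ofList l).Nodup := PySem.Set.nodup_ofList l
  have hfs : (PySem.Set.ofList l).toFinset = l.toFinset := by
    ext c
    simp [List.mem_toFinset, PySem.Set.mem_ofList]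
  rw [← List.toFinset_card_of_nodup hnd, hfs]

-- distinct count = length iff no duplicates
theorem cardD (l : List Char) : l.toFinset.card = l.length ↔ l.Nodup := by
  constructor
  · intro h
    rw [List.card_toFinset] at h
    have hsub := l.dedup_sublist
    have := hsub.eq_of_length h
    rw [← this]
    exact l.nodup_dedup
  · exact List.toFinset_card_of_nodup

theorem cardAppend (l : List Char) (c : Char) :
    (l ++ [c]).toFinset.card = l.toFinset.card + (if c ∈ l then 0 else 1) := by
  rw [List.toFinset_append]
  by_cases h : c ∈ l
  · rw [if_pos h]
    have : ({c} : Finset Char) ⊆ l.toFinset := by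
      simp [Finset.singleton_subset_iff, List.mem_toFinset, h]
    rw [Finset.union_eq_left.mpr (by simpa using this)]
    omega
  · rw [if_neg h]
    have : l.toFinset ∪ [c].toFinset = insert c l.toFinset := by
      rw [Finset.union_comm]
      simp
    rw [this, Finset.card_insert_of_notMem (by simpa using h)]

theorem cardCons (l : List Char) (d : Char) :
    (d :: l).toFinset.card = l.toFinset.card + (if d ∈ l then 0 else 1) := by
  rw [List.toFinset_cons]
  by_cases h : d ∈ l
  · rw [if_pos h, Finset.insert_eq_self.mpr (List.mem_toFinset.mpr h)]
    omega
  · rw [if_neg h, Finset.card_insert_of_notMem (by simpa using h)]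

-- the sliding window the counts dict describes on entry to iteration i
def win (s : List Char) (flN i : Nat) : List Char := (s.take i).drop (i - flN)

theorem win_succ_small (s : List Char) (flN i : Nat) (hil : i < s.length) (h : i < flN) :
    win s flN (i + 1) = win s flN i ++ [s[i]] := by
  unfold win
  rw [Nat.sub_eq_zero_of_le h, Nat.sub_eq_zero_of_le (by omega), List.drop_zero, List.drop_zero]
  rw [List.take_add_one, List.getElem?_eq_getElem hil]
  rfl

theorem win_succ_big (s : List Char) (flN i : Nat) (hil : i < s.length) (h : flN ≤ i) :
    win s flN i ++ [s[i]] = s[i - flN]'(by omega) :: win s flN (i + 1) := by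
  unfold win
  have htake : s.take (i+1) = s.take i ++ [s[i]] := by
    rw [List.take_add_one, List.getElem?_eq_getElem hil]; rfl
  have hd : (s.take i).drop (i - flN) ++ [s[i]] = (s.take (i+1)).drop (i - flN) := by
    rw [htake, List.drop_append_of_le_length (by simp; omega)]
  rw [hd, List.drop_eq_getElem_cons (by simp; omega)]
  congr 1
  · rw [List.getElem_take]
  · congr 1
    omega

theorem win_len (s : List Char) (flN i : Nat) (hi : i ≤ s.length) :
    (win s flN i).length = i - (i - flN) := by
  simp [win]
  omega

theorem loopA_neg (s : List Char) (fl : Int) (hfl : fl < 0) (b : Int) :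
    sopLoopA s fl b = none := by
  induction b using sopLoopA.induct s fl with
  | case1 b h frame hchk =>
      exfalso
      omega
  | case2 b h frame hchk ih =>
      rw [sopLoopA, dif_pos h]
      simp only []
      rw [if_neg hchk]
      exact ih
  | case3 b h => rw [sopLoopA, dif_neg h]

theorem loopA_zero (s : List Char) : sopLoopA s 0 0 = some 0 := by
  rw [sopLoopA]
  have h : (0 : Int) + 0 ≤ (s.length : Int) := by omega
  rw [dif_pos h]
  simp [PySem.List.slice, PySem.List.clampIdx]

theorem loopA_eq (s : List Char) (fl : Int) (hfl : 1 ≤ fl) (bn : Nat) :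
    sopLoopA s fl (bn : Int) = findFrom s fl.toNat bn := by
  have hcast : fl = (fl.toNat : Int) := (Int.toNat_of_nonneg (by omega)).symm
  induction bn using findFrom.induct s fl.toNat with
  | case1 b h hnd =>
      rw [sopLoopA, dif_pos (by omega)]
      simp only []
      have hframe : PySem.List.slice s (some (b : Int)) (some ((b : Int) + fl))
          = (s.drop b).take fl.toNat := by
        rw [hcast]
        exact_mod_cast PySem.List.slice_natCast_add s b fl.toNat
      rw [hframe, findFrom, dif_pos h, if_pos hnd]
      have hlen : ((s.drop b).take fl.toNat).length = fl.toNat := by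
        simp
        omega
      have h1 : (PySem.Set.ofList ((s.drop b).take fl.toNat)).length = fl.toNat := by
        rw [setLen, (cardD _).mpr hnd, hlen]
      rw [if_pos (by omega)]
      congr 1
      omega
  | case2 b h hnd ih =>
      rw [sopLoopA, dif_pos (by omega)]
      simp only []
      have hframe : PySem.List.slice s (some (b : Int)) (some ((b : Int) + fl))
          = (s.drop b).take fl.toNat := by
        rw [hcast]
        exact_mod_cast PySem.List.slice_natCast_add s b fl.toNat
      rw [hframe, findFrom, dif_pos h, if_neg hnd]
      have hlen : ((s.drop b).take fl.toNat).length = fl.toNat := by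
        simp
        omega
      rw [if_neg (by
        intro hc
        rw [setLen] at hc
        exact hnd ((cardD _).mp (by omega)))]
      rw [show ((b : Int) + 1) = ((b + 1 : Nat) : Int) by push_cast; omega]
      exact ih
  | case3 b h =>
      rw [sopLoopA, dif_neg (by omega), findFrom, dif_neg h]

theorem loopB_eq (s : List Char) (fl : Int) (hfl : 1 ≤ fl) (i : Nat)
    (counts : PySem.Dict Char Int) (dups : Int) (hi : i ≤ s.length)
    (hc : ∀ c, counts.getD c 0 = ((win s fl.toNat i).count c : Int))
    (hd : dups = ((win s fl.toNat i).length : Int) - ((win s fl.toNat i).toFinset.card : Int)) :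
    sopLoopB s fl i counts dups (s.drop i) = findFrom s fl.toNat (i + 1 - fl.toNat) := by
  have hflN : 1 ≤ fl.toNat := by omega
  have hcast : fl = (fl.toNat : Int) := (Int.toNat_of_nonneg (by omega)).symm
  -- strong induction on the number of characters left to process
  induction hn : s.length - i using Nat.strong_induction_on generalizing i counts dups with
  | _ n ih =>
  by_cases hil : i < s.length
  case neg =>
    have hie : i = s.length := by omega
    rw [List.drop_of_length_le (by omega), sopLoopB, findFrom, dif_neg (by omega)]
  case pos =>
  set flN := fl.toNat with hflNdef
  rw [List.drop_eq_getElem_cons hil, sopLoopB]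
  simp only []
  set c := s[i] with hcdef
  set w := win s flN i with hwdef
  set w' := win s flN (i + 1) with hw'def
  -- counts after the increment describe w ++ [c]
  have hc1 : ∀ c', (counts.modify c 0 (· + 1)).getD c' 0 = ((w ++ [c]).count c' : Int) := by
    intro c'
    rw [PySem.Dict.getD_modify]
    by_cases hcc : c' = c
    · rw [if_pos hcc, hc c, hcc]
      simp [List.count_append]
    · rw [if_neg hcc, hc c']
      have h0 : [c].count c' = 0 := by
        simp [List.count_singleton]
        exact fun h => absurd h.symm hcc
      rw [List.count_append, h0]
      push_cast
      omega
  have hd1 : (if 1 < (counts.modify c 0 (· + 1)).getD c 0 then dups + 1 else dups)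
      = ((w ++ [c]).length : Int) - ((w ++ [c]).toFinset.card : Int) := by
    rw [hc1 c]
    have hcnt : (w ++ [c]).count c = w.count c + 1 := by
      simp [List.count_append]
    rw [hcnt, cardAppend]
    simp only [List.length_append, List.length_singleton]
    by_cases hm : c ∈ w
    · rw [if_pos (by have := List.count_pos_iff.mpr hm; push_cast; omega), if_pos hm]
      push_cast
      omega
    · rw [if_neg (by have : w.count c = 0 := List.count_eq_zero.mpr hm; push_cast; omega), if_neg hm]
      push_cast
      omega
  -- once the state describes w', the rest of the iteration agrees with the reference search
  have hfinal : ∀ (cts : PySem.Dict Char Int) (dp : Int),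
      (∀ c', cts.getD c' 0 = (w'.count c' : Int)) →
      dp = (w'.length : Int) - (w'.toFinset.card : Int) →
      (if fl ≤ (i : Int) + 1 ∧ dp = 0 then some ((i : Int) + 1)
       else sopLoopB s fl (i + 1) cts dp (s.drop (i + 1))) = findFrom s flN (i + 1 - flN) := by
    intro cts dp hC hD
    have hw'len : w'.length = (i + 1) - (i + 1 - flN) := win_len s flN (i + 1) (by omega)
    by_cases hle : flN ≤ i + 1
    · have hlen' : w'.length = flN := by omega
      have hwin : (s.drop (i + 1 - flN)).take flN = w' := by
        rw [hw'def]
        unfold win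
        rw [List.drop_take]
        congr 1
        omega
      by_cases hnd : w'.Nodup
      · have hdp : dp = 0 := by
          have := (cardD w').mpr hnd
          rw [hD]
          omega
        rw [if_pos ⟨by omega, hdp⟩, findFrom, dif_pos (by omega), if_pos (hwin ▸ hnd)]
        congr 1
        omega
      · have hdp : dp ≠ 0 := by
          intro h0
          apply hnd
          apply (cardD w').mp
          rw [hD] at h0
          omega
        rw [if_neg (by rintro ⟨_, h2⟩; exact hdp h2), findFrom, dif_pos (by omega)]
        rw [if_neg (by rw [hwin]; exact hnd)]
        rw [ih (s.length - (i + 1)) (by omega) (i + 1) cts dp (by omega) hC hD rfl]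
        congr 1
        omega
    · rw [if_neg (by rintro ⟨h1, _⟩; omega)]
      rw [ih (s.length - (i + 1)) (by omega) (i + 1) cts dp (by omega) hC hD rfl]
      congr 1
      omega
  by_cases hif : fl ≤ (i : Int)
  · -- the window is full: the oldest character s[i - flN] is evicted
    have hfli : flN ≤ i := by omega
    have hidx : i - flN < s.length := by omega
    have hdidx : PySem.List.pyGetD s ((i : Int) - fl) ' ' = s[i - flN]'hidx := by
      rw [PySem.List.pyGetD_eq_getElem s ' ' (by omega) (by omega)]
      simp only [show ((i : Int) - fl).toNat = i - flN from by omega]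
    have hcons : w ++ [c] = s[i - flN]'hidx :: w' := by
      rw [hwdef, hw'def, hcdef]
      exact win_succ_big s flN i hil hfli
    have hc2 : ∀ c',
        ((counts.modify c 0 (· + 1)).modify (s[i - flN]'hidx) 0 (· - 1)).getD c' 0
          = (w'.count c' : Int) := by
      intro c'
      rw [PySem.Dict.getD_modify]
      by_cases hdd : c' = s[i - flN]'hidx
      · rw [if_pos hdd, hc1 _, hcons, hdd]
        simp
      · rw [if_neg hdd, hc1 c', hcons, List.count_cons_of_ne (fun h => hdd h.symm)]
    have hd2 : (if 0 < ((counts.modify c 0 (· + 1)).modify (s[i - flN]'hidx) 0 (· - 1)).getD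
            (s[i - flN]'hidx) 0
          then (if 1 < (counts.modify c 0 (· + 1)).getD c 0 then dups + 1 else dups) - 1
          else (if 1 < (counts.modify c 0 (· + 1)).getD c 0 then dups + 1 else dups))
        = (w'.length : Int) - (w'.toFinset.card : Int) := by
      rw [hc2 _, hd1, hcons, cardCons]
      simp only [List.length_cons]
      by_cases hm : s[i - flN]'hidx ∈ w'
      · rw [if_pos (by have := List.count_pos_iff.mpr hm; omega), if_pos hm]
        push_cast
        omega
      · rw [if_neg (by have : w'.count (s[i - flN]'hidx) = 0 := List.count_eq_zero.mpr hm
                       omega), if_neg hm]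
        push_cast
        omega
    simp only [if_pos hif, hdidx]
    exact hfinal _ _ hc2 hd2
  · -- the window is still growing: no eviction
    have hsmall : i < flN := by omega
    have happ : w' = w ++ [c] := by
      rw [hwdef, hw'def, hcdef]
      exact win_succ_small s flN i hil hsmall
    simp only [if_neg hif]
    exact hfinal _ _ (by rw [happ]; exact hc1) (by rw [happ]; exact hd1)

theorem sop_marker_offset_spec : Claim_equal_sop_marker_offset := by
  intro ds fl _
  unfold Spec_sop_marker_offset sop_marker_offset sop_marker_offset_alt
  rcases lt_trichotomy fl 0 with h | h | h
  · rw [if_pos h, loopA_neg _ _ h]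
  · subst h
    rw [if_neg (lt_irrefl 0), if_pos rfl]
    exact loopA_zero _
  · have hfl : 1 ≤ fl := h
    rw [if_neg (by omega), if_neg (by omega)]
    have hA := loopA_eq ds.toList fl hfl 0
    norm_num at hA
    have hB := loopB_eq ds.toList fl hfl 0 PySem.Dict.empty 0 (by omega)
      (by intro c; simp [win, PySem.Dict.getD_empty]) (by simp [win])
    simp only [List.drop_zero] at hB
    rw [hA, hB]
    congr 1
    omega
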